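-- pv_equiv track=rewrite | github.com/wsmriti20/NLP-Final-Project | source.py | ascii_diff
-- ===== SOURCE A (Python) =====
-- def ascii_diff(sentence1, sentence2):
--     diff = 0
--     words = sentence1.split(' ')
--     for word in words:
--         for c in word:
--             diff += ord(c)
--     words = sentence2.split(' ')
--     for word in words:
--         for c in word:
--             diff -= ord(c)
--     return diff
-- ===== SOURCE B (Python) =====
-- def ascii_diff(sentence1, sentence2):
--     def f(s):
--         return sum(map(ord, s)) - 32 * s.count(' ')
--     return f(sentence1) - f(sentence2)
-- ===== Notes on version B (the rewrite author's own statement) =====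
-- stated objective: simpler
-- what changed: B sums the ASCII codes of the whole string in one pass and corrects by 32 per space found with str.count, instead of splitting on ' ' and accumulating over a nested word/character loop.
import Mathlib
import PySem

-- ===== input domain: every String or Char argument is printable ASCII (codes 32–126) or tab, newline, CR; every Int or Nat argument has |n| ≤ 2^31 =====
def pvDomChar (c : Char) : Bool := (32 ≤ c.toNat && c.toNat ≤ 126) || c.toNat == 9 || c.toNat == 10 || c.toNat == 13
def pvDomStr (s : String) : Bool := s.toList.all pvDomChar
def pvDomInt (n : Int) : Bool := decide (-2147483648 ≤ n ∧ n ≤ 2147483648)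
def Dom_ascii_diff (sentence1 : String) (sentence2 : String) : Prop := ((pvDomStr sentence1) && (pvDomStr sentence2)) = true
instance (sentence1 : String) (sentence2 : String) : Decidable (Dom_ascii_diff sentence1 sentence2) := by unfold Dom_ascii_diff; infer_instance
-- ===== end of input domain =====

-- B sums all ASCII codes in one pass and subtracts 32 per space (str.count), instead of A's split-on-space nested loops: simpler decomposition, same O(n) cost.

-- ===== PORT A =====
-- s.split(' ') is PySem.Str.split?; the separator " " is nonempty so it is always `some`
-- (the `.getD []` is only a totality guard).
def ascii_diff (sentence1 : String) (sentence2 : String) : Int :=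
  let diff : Int := 0
  let words := (PySem.Str.split? sentence1 " ").getD []
  let diff := words.foldl (fun d w => w.toList.foldl (fun d c => d + (c.toNat : Int)) d) diff
  let words := (PySem.Str.split? sentence2 " ").getD []
  let diff := words.foldl (fun d w => w.toList.foldl (fun d c => d - (c.toNat : Int)) d) diff
  diff

-- ===== PORT B =====
-- f(s) = sum(map(ord, s)) - 32 * s.count(' ')
def pvF (s : String) : Int :=
  (s.toList.map (fun c => (c.toNat : Int))).sum - 32 * (PySem.Str.count s " " : Int)

def ascii_diff_alt (sentence1 : String) (sentence2 : String) : Int :=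
  pvF sentence1 - pvF sentence2

-- ===== PRECONDITION & SPEC =====
def Spec_ascii_diff (sentence1 : String) (sentence2 : String) (out : Int) : Prop := out = ascii_diff_alt sentence1 sentence2
instance (sentence1 : String) (sentence2 : String) (out : Int) : Decidable (Spec_ascii_diff sentence1 sentence2 out) := by unfold Spec_ascii_diff; infer_instance

-- ===== CLAIM (what is proved, stated in full; the proofs are below) =====
def Claim_equal_ascii_diff : Prop := ∀ (sentence1 : String) (sentence2 : String), Dom_ascii_diff sentence1 sentence2 → Spec_ascii_diff sentence1 sentence2 (ascii_diff sentence1 sentence2)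

-- ===== LEMMAS AND PROOFS =====

-- sum of ASCII codes of a character list
def pvChSum (l : List Char) : Int := (l.map (fun c => (c.toNat : Int))).sum

-- A's inner character loop adds the character sum
theorem pv_foldl_add_chars (l : List Char) (d : Int) :
    l.foldl (fun d c => d + (c.toNat : Int)) d = d + pvChSum l := by
  induction l generalizing d with
  | nil => simp [pvChSum]
  | cons c t ih => simp only [List.foldl_cons]; rw [ih]; simp [pvChSum]; ring

theorem pv_foldl_sub_chars (l : List Char) (d : Int) :
    l.foldl (fun d c => d - (c.toNat : Int)) d = d - pvChSum l := by
  induction l generalizing d with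
  | nil => simp [pvChSum]
  | cons c t ih => simp only [List.foldl_cons]; rw [ih]; simp [pvChSum]; ring

-- A's outer word loop adds/subtracts the sum over the flattened word list
theorem pv_foldl_add_words (ws : List String) (d : Int) :
    ws.foldl (fun d w => w.toList.foldl (fun d c => d + (c.toNat : Int)) d) d
      = d + pvChSum (ws.map String.toList).flatten := by
  induction ws generalizing d with
  | nil => simp [pvChSum]
  | cons w t ih => simp only [List.foldl_cons]; rw [pv_foldl_add_chars, ih]; simp [pvChSum]; ring

theorem pv_foldl_sub_words (ws : List String) (d : Int) :
    ws.foldl (fun d w => w.toList.foldl (fun d c => d - (c.toNat : Int)) d) d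
      = d - pvChSum (ws.map String.toList).flatten := by
  induction ws generalizing d with
  | nil => simp [pvChSum]
  | cons w t ih => simp only [List.foldl_cons]; rw [pv_foldl_sub_chars, ih]; simp [pvChSum]; ring

-- splitting on a single space and flattening = removing the spaces
theorem pv_splitOn_go_space (fuel : Nat) (l cur : List Char) (acc : List (List Char)) (h : l.length < fuel) :
    (PySem.Chars.splitOn.go [' '] fuel l cur acc).flatten
      = acc.reverse.flatten ++ cur.reverse ++ l.filter (fun c => !(c == ' ')) := by
  induction fuel generalizing l cur acc with
  | zero => omega
  | succ fuel ih =>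
    cases l with
    | nil => simp [PySem.Chars.splitOn.go]
    | cons c t =>
      by_cases hc : c = ' '
      · subst hc
        have hp : List.isPrefixOf [' '] (' ' :: t) = true := by simp [List.isPrefixOf]
        simp only [PySem.Chars.splitOn.go, hp, if_pos]
        rw [ih _ _ _ (by simpa using Nat.lt_of_succ_lt_succ h)]
        simp
      · have hp : List.isPrefixOf [' '] (c :: t) = false := by
          simp [List.isPrefixOf]
          exact fun h' => hc h'.symm
        simp only [PySem.Chars.splitOn.go, hp, Bool.false_eq_true, if_false]
        rw [ih _ _ _ (by simpa using Nat.lt_of_succ_lt_succ h)]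
        simp [hc]

theorem pv_flatten_splitOn (l : List Char) :
    (PySem.Chars.splitOn l [' ']).flatten = l.filter (fun c => !(c == ' ')) := by
  unfold PySem.Chars.splitOn
  rw [pv_splitOn_go_space _ _ _ _ (by omega)]
  simp

-- counting the single-character substring " " = List.count ' '
theorem pv_count_go_space (fuel : Nat) (l : List Char) (acc : Nat) (h : l.length ≤ fuel) :
    PySem.Chars.count.go [' '] fuel l acc = acc + l.count ' ' := by
  induction fuel generalizing l acc with
  | zero => cases l with
    | nil => simp [PySem.Chars.count.go]
    | cons c t => simp at h
  | succ fuel ih =>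
    cases l with
    | nil => simp [PySem.Chars.count.go]
    | cons c t =>
      by_cases hc : c = ' '
      · subst hc
        have hp : List.isPrefixOf [' '] (' ' :: t) = true := by simp [List.isPrefixOf]
        simp only [PySem.Chars.count.go, hp, if_pos]
        rw [ih _ _ (by simpa using Nat.le_of_succ_le_succ h)]
        simp
        omega
      · have hp : List.isPrefixOf [' '] (c :: t) = false := by
          simp [List.isPrefixOf]
          exact fun h' => hc h'.symm
        simp only [PySem.Chars.count.go, hp, Bool.false_eq_true, if_false]
        rw [ih _ _ (by simpa using Nat.le_of_succ_le_succ h)]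
        simp [hc]

theorem pv_count_space (l : List Char) :
    PySem.Chars.count l [' '] = l.count ' ' := by
  unfold PySem.Chars.count
  simp [pv_count_go_space l.length l 0 le_rfl]

-- the total-then-correct identity: full sum = filtered sum + 32 per space
theorem pv_chsum_filter (l : List Char) :
    pvChSum (l.filter (fun c => !(c == ' '))) = pvChSum l - 32 * (l.count ' ' : Int) := by
  induction l with
  | nil => simp [pvChSum]
  | cons c t ih =>
    by_cases hc : c = ' '
    · subst hc
      simp [pvChSum] at *
      rw [ih]
      ring_nf
    · simp [pvChSum, hc] at *
      rw [ih]
      ring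

theorem pv_side (s : String) :
    pvChSum ((PySem.Chars.splitOn s.toList [' ']).flatten) = pvF s := by
  rw [pv_flatten_splitOn, pv_chsum_filter, pvF]
  have : PySem.Str.count s " " = s.toList.count ' ' := by
    unfold PySem.Str.count
    have : (" " : String).toList = [' '] := by decide
    rw [this, pv_count_space]
  rw [this]
  rfl

theorem pv_words_eq (s : String) :
    ((PySem.Str.split? s " ").getD []).map String.toList = PySem.Chars.splitOn s.toList [' '] := by
  unfold PySem.Str.split? PySem.Chars.split?
  have h : (" " : String).toList = [' '] := by decide
  rw [h]
  simp [PySem.Chars.splitOn, Function.comp_def, String.toList_ofList]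

-- ===== VERDICT (by name: the statement is the Claim_ definition above) =====
theorem ascii_diff_spec : Claim_equal_ascii_diff := by
  intro s1 s2 _
  unfold Spec_ascii_diff ascii_diff ascii_diff_alt
  simp only [pv_foldl_add_words, pv_foldl_sub_words]
  rw [pv_words_eq, pv_words_eq, pv_side, pv_side]
  ring
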